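-- pv_equiv track=rewrite | github.com/JanHaladej/ProjektOrlog | OrlogModule.py | zistiStatyKociek
-- ===== SOURCE A (Python) =====
-- def zistiStatyKociek(vybraneKocky):  # vrati vsetky premenne podla kociek co bolo hodene
--     sekeraDMG = 0
--     sipDMG = 0
--     rukyDMG = 0
--     helmyHP = 0
--     stityHP = 0
--     bozskeTokeny = 0
--
--     for znak in vybraneKocky:
--         if znak == 1:
--             sekeraDMG += 1
--         elif znak == 2:
--             sipDMG += 1
--         elif znak == 3:
--             rukyDMG += 1
--         elif znak == 4:
--             helmyHP += 1
--         elif znak == 5: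
--             stityHP += 1
--         elif znak == 6:
--             sipDMG += 1
--             bozskeTokeny += 1
--         elif znak == 7:
--             rukyDMG += 1
--             bozskeTokeny += 1
--         elif znak == 8:
--             helmyHP += 1
--             bozskeTokeny += 1
--         else:  # znak == 9
--             stityHP += 1
--             bozskeTokeny += 1
--     return sekeraDMG, sipDMG, rukyDMG, helmyHP, stityHP, bozskeTokeny
-- ===== SOURCE B (Python) =====
-- def zistiStatyKociek(vybraneKocky):
--     # tally the eight known faces once, everything else falls into the "9" bucket
--     c = [vybraneKocky.count(f) for f in range(1, 9)]
--     other = len(vybraneKocky) - sum(c)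
--     c1, c2, c3, c4, c5, c6, c7, c8 = c
--     return (c1,
--             c2 + c6,
--             c3 + c7,
--             c4 + c8,
--             c5 + other,
--             c6 + c7 + c8 + other)
-- ===== Notes on version B (the rewrite author's own statement) =====
-- stated objective: idiomatic
-- what changed: Replaces the per-element nine-way branching accumulation with a tally-then-combine decomposition: count each face 1..8 once, derive the 'other' bucket from the length, and compute the six aggregates as closed-form sums of counts.
import Mathlib
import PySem

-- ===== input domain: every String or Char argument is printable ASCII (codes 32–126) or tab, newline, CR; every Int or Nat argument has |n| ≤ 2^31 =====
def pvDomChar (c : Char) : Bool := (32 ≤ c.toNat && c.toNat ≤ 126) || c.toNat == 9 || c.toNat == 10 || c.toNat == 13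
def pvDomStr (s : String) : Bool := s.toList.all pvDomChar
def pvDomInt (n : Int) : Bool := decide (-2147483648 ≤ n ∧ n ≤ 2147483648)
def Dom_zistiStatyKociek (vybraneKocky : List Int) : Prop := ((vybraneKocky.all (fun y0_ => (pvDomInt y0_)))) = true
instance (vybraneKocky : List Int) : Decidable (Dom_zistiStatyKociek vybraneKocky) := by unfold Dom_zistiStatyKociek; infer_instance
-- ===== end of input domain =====

-- B tallies each face once (list.count) and combines the counts in closed form, instead of A's per-element nine-way branch; idiomatic, same O(n) cost.


-- ===== PORT A =====
-- step of A's loop body (one dice face updates the six accumulators)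
def zistiStatyStep (s : Int × Int × Int × Int × Int × Int) (znak : Int) : Int × Int × Int × Int × Int × Int :=
  let (sekeraDMG, sipDMG, rukyDMG, helmyHP, stityHP, bozskeTokeny) := s
  if znak == 1 then (sekeraDMG + 1, sipDMG, rukyDMG, helmyHP, stityHP, bozskeTokeny)
  else if znak == 2 then (sekeraDMG, sipDMG + 1, rukyDMG, helmyHP, stityHP, bozskeTokeny)
  else if znak == 3 then (sekeraDMG, sipDMG, rukyDMG + 1, helmyHP, stityHP, bozskeTokeny)
  else if znak == 4 then (sekeraDMG, sipDMG, rukyDMG, helmyHP + 1, stityHP, bozskeTokeny)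
  else if znak == 5 then (sekeraDMG, sipDMG, rukyDMG, helmyHP, stityHP + 1, bozskeTokeny)
  else if znak == 6 then (sekeraDMG, sipDMG + 1, rukyDMG, helmyHP, stityHP, bozskeTokeny + 1)
  else if znak == 7 then (sekeraDMG, sipDMG, rukyDMG + 1, helmyHP, stityHP, bozskeTokeny + 1)
  else if znak == 8 then (sekeraDMG, sipDMG, rukyDMG, helmyHP + 1, stityHP, bozskeTokeny + 1)
  else (sekeraDMG, sipDMG, rukyDMG, helmyHP, stityHP + 1, bozskeTokeny + 1)

def zistiStatyKociek (vybraneKocky : List Int) : Int × Int × Int × Int × Int × Int :=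
  vybraneKocky.foldl zistiStatyStep (0, 0, 0, 0, 0, 0)

-- ===== PORT B =====
-- tally-then-combine: count each face 1..8 once, derive the rest from the length
def zistiStatyKociek_alt (vybraneKocky : List Int) : Int × Int × Int × Int × Int × Int :=
  let c1 : Int := vybraneKocky.count 1
  let c2 : Int := vybraneKocky.count 2
  let c3 : Int := vybraneKocky.count 3
  let c4 : Int := vybraneKocky.count 4
  let c5 : Int := vybraneKocky.count 5
  let c6 : Int := vybraneKocky.count 6
  let c7 : Int := vybraneKocky.count 7
  let c8 : Int := vybraneKocky.count 8
  let other : Int := (vybraneKocky.length : Int) - (c1 + c2 + c3 + c4 + c5 + c6 + c7 + c8)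
  (c1, c2 + c6, c3 + c7, c4 + c8, c5 + other, c6 + c7 + c8 + other)

-- ===== PRECONDITION & SPEC =====
def Spec_zistiStatyKociek (vybraneKocky : List Int) (out : Int × Int × Int × Int × Int × Int) : Prop := out = zistiStatyKociek_alt vybraneKocky
instance (vybraneKocky : List Int) (out : Int × Int × Int × Int × Int × Int) : Decidable (Spec_zistiStatyKociek vybraneKocky out) := by unfold Spec_zistiStatyKociek; infer_instance

-- ===== CLAIM (what is proved, stated in full; the proofs are below) =====
def Claim_equal_zistiStatyKociek : Prop := ∀ (vybraneKocky : List Int), Dom_zistiStatyKociek vybraneKocky → Spec_zistiStatyKociek vybraneKocky (zistiStatyKociek vybraneKocky)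

-- ===== LEMMAS AND PROOFS =====

-- count of a face as an Int (matches the counts B's port takes)
def cntI (l : List Int) (k : Int) : Int := l.count k

set_option maxHeartbeats 2000000 in
lemma zistiStaty_foldl (l : List Int) :
    ∀ (s : Int × Int × Int × Int × Int × Int),
    l.foldl zistiStatyStep s
    = (s.1 + cntI l 1,
       s.2.1 + (cntI l 2 + cntI l 6),
       s.2.2.1 + (cntI l 3 + cntI l 7),
       s.2.2.2.1 + (cntI l 4 + cntI l 8),
       s.2.2.2.2.1 + (cntI l 5 + ((l.length : Int) -
         (cntI l 1 + cntI l 2 + cntI l 3 + cntI l 4 + cntI l 5 + cntI l 6 + cntI l 7 + cntI l 8))),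
       s.2.2.2.2.2 + (cntI l 6 + cntI l 7 + cntI l 8 + ((l.length : Int) -
         (cntI l 1 + cntI l 2 + cntI l 3 + cntI l 4 + cntI l 5 + cntI l 6 + cntI l 7 + cntI l 8)))) := by
  induction l with
  | nil => intro s; simp [cntI]
  | cons x t ih =>
    intro s
    obtain ⟨a, b, c, d, e, f⟩ := s
    rw [List.foldl_cons, ih]
    simp only [zistiStatyStep, cntI, List.count_cons, List.length_cons, beq_iff_eq]
    split_ifs with h1 h2 h3 h4 h5 h6 h7 h8 <;>
      simp_all [Prod.ext_iff] <;> omega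

-- ===== VERDICT (by name: the statement is the Claim_ definition above) =====
theorem zistiStatyKociek_spec : Claim_equal_zistiStatyKociek := by
  intro l _
  show zistiStatyKociek l = zistiStatyKociek_alt l
  rw [zistiStatyKociek, zistiStaty_foldl l (0, 0, 0, 0, 0, 0)]
  simp [zistiStatyKociek_alt, cntI]
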